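-- pv_equiv track=rewrite | github.com/BayaaByaa/RECONNAISSANCE-D-UN-GRAPHE-SCINDE | interface.py | trouver_sommets_simpliciaux_et_les_supprimer
-- ===== SOURCE A (Python) =====
-- def supprimer_sommet(sommet, matrice_adjacence):
--
--     ''' supprime un sommet et toutes ses arêtes dans la matrice d'adjacence
--     en mettant à zéro les entrées correspondantes dans la matrice.'''
--     n = len(matrice_adjacence)
--     for i in range(n):
--         matrice_adjacence[i][sommet] = 0
--         matrice_adjacence[sommet][i] = 0 # symetrie de la  matrice
--     return matrice_adjacence
--
-- def trouver_sommets_simpliciaux_et_les_supprimer(matrice_adjacence):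
--     # Un sommet x d’un graphe G est dit simplicial si son voisinage NG(x) est une clique.
--     n = len(matrice_adjacence)
--     sommets_simpliciaux = []
--     for i in range(n):
--      for sommet in range(n):
--             # Trouver les voisins du sommet
--          voisins = [voisin for voisin in range(n) if matrice_adjacence[sommet][voisin] == 1]
--          if len(voisins) >= 1: # au moins un seul voisin
--              # Créer une sous-matrice avec les voisins du sommet
--              sous_matrice = [[matrice_adjacence[i][j] for j in voisins] for i in voisins]
--              # Vérifier si la sous-matrice est une clique
--              #Si c'est une clique, le sommet est ajouté à la liste des sommets simpliciaux et supprimé du graphe.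
--              est_clique = all(all(sous_matrice[i][j] == 1 for j in range(len(voisins)) if j != i) for i in range(len(voisins)))
--              if est_clique:
--                  sommets_simpliciaux.append(sommet)
--                  supprimer_sommet(sommet, matrice_adjacence)
--                  break
--
--     return sommets_simpliciaux
-- ===== SOURCE B (Python) =====
-- def trouver_sommets_simpliciaux_et_les_supprimer(matrice_adjacence):
--     # Incremental algorithm: build adjacency sets and a cached per-vertex
--     # "is simplicial" flag once; each round takes the smallest flagged vertex,
--     # deletes it, and recomputes the flag ONLY for the vertices whose
--     # neighborhood contained it (deleting v cannot change any other flag,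
--     # since no other vertex's neighborhood or internal edges are touched).
--     # Mirrors A's in-place zeroing of the removed vertices' rows/columns.
--     n = len(matrice_adjacence)
--     nbr = [{j for j in range(n) if matrice_adjacence[v][j] == 1} for v in range(n)]
--
--     def est_simplicial(nb, v):
--         nv = nb[v]
--         return bool(nv) and all(nv - {u} <= nb[u] for u in nv)
--
--     flag = [est_simplicial(nbr, v) for v in range(n)]
--     resultat = []
--     while True:
--         v = next((u for u in range(n) if flag[u]), None)
--         if v is None:
--             break
--         resultat.append(v)
--         for i in range(n):
--             matrice_adjacence[i][v] = 0
--             matrice_adjacence[v][i] = 0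
--         touche = {u for u in range(n) if v in nbr[u]}
--         nbr = [set() if u == v else nbr[u] - {v} for u in range(n)]
--         flag = [False if u == v else
--                 (est_simplicial(nbr, u) if u in touche else flag[u])
--                 for u in range(n)]
--     return resultat
-- ===== Notes on version B (the rewrite author's own statement) =====
-- stated objective: faster
-- what changed: B precomputes adjacency sets and a cached per-vertex 'is simplicial' flag once, then after each deletion recomputes the flag only for the vertices whose neighborhood contained the deleted vertex (a locality argument shows no other flag can change) and stops when no flag is set, whereas A runs n full rounds, each rebuilding every neighbor list and index submatrix from the matrix and re-testing every vertex.
import Mathlib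
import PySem

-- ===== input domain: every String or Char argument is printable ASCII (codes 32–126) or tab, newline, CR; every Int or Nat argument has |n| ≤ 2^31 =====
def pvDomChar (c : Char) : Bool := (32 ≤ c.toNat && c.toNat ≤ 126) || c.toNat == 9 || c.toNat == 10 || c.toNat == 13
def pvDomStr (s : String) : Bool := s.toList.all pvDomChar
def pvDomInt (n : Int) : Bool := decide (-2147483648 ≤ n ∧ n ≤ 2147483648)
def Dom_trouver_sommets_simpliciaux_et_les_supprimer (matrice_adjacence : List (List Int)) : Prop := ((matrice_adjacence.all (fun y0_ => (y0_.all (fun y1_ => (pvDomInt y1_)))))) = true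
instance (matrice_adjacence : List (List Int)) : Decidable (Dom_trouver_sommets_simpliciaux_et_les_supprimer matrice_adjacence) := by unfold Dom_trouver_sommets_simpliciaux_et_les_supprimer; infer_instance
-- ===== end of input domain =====

-- B replaces A's n full O(n^3) matrix re-scans by adjacency sets plus a cached per-vertex
-- simplicial flag, recomputed after a deletion only for the vertices whose neighborhood
-- contained the deleted vertex; return values proved equal (both Pythons also zero the removed
-- vertices' rows/columns of the input matrix in place, a side effect outside this claim).

-- ===== PORT A =====
-- matrix[i][j] read; the default 0 is never reached on inputs satisfying Pre_
def pvGet (M : List (List Int)) (i j : Nat) : Int := (M.getD i []).getD j 0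

-- matrix[i][j] = 0 ; out-of-range writes (never reached inside Pre_) are no-ops
def pvSet0 (M : List (List Int)) (i j : Nat) : List (List Int) := M.set i ((M.getD i []).set j 0)

def supprimer_sommet (sommet : Nat) (M : List (List Int)) : List (List Int) :=
  (List.range M.length).foldl (fun M i => pvSet0 (pvSet0 M i sommet) sommet i) M

-- the inner 'for sommet in range(n): … break' loop of A
def aScan (n : Nat) (M : List (List Int)) (res : List Int) : List Nat → List (List Int) × List Int
  | [] => (M, res)
  | sommet :: rest =>
    let voisins := (List.range n).filter (fun voisin => pvGet M sommet voisin == 1)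
    if 1 ≤ voisins.length then
      let sous_matrice := voisins.map (fun i => voisins.map (fun j => pvGet M i j))
      let est_clique := (List.range voisins.length).all (fun i =>
        (List.range voisins.length).all (fun j => j == i || (sous_matrice.getD i []).getD j 0 == 1))
      if est_clique then (supprimer_sommet sommet M, res ++ [(sommet : Int)])
      else aScan n M res rest
    else aScan n M res rest

def trouver_sommets_simpliciaux_et_les_supprimer (matrice_adjacence : List (List Int)) : List Int :=
  let n := matrice_adjacence.length
  ((List.range n).foldl (fun st _ => aScan n st.1 st.2 (List.range n)) (matrice_adjacence, [])).2

-- ===== PORT B =====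
-- nbr = [{j for j in range(n) if matrice_adjacence[v][j] == 1} for v in range(n)]
def bNbr (M : List (List Int)) (n : Nat) : List (PySem.Set Nat) :=
  (List.range n).map (fun v => PySem.Set.ofList ((List.range n).filter (fun j => pvGet M v j == 1)))

-- est_simplicial(nb, v): bool(nv) and all(nv - {u} <= nb[u] for u in nv)
def bSimp (nb : List (PySem.Set Nat)) (v : Nat) : Bool :=
  let nv := nb.getD v []
  !nv.isEmpty && nv.all (fun u => PySem.Set.issubset (PySem.Set.diff nv [u]) (nb.getD u []))

-- v = next((u for u in range(n) if flag[u]), None)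
def bNext (flag : List Bool) : List Nat → Option Nat
  | [] => none
  | u :: rest => if flag.getD u false then some u else bNext flag rest

-- one removal step: touche, then the rebuilt nbr and flag lists (Source B's in-place zeroing of the
-- input matrix only mutates the matrix, which B never reads again, so it is not part of the state)
def bStep (n : Nat) (nbr : List (PySem.Set Nat)) (flag : List Bool) (v : Nat) :
    List (PySem.Set Nat) × List Bool :=
  let touche : PySem.Set Nat :=
    PySem.Set.ofList ((List.range n).filter (fun u => PySem.Set.contains (nbr.getD u []) v))
  let nbr' := (List.range n).map (fun u =>
    if u == v then ([] : PySem.Set Nat) else PySem.Set.diff (nbr.getD u []) [v])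
  let flag' := (List.range n).map (fun u =>
    if u == v then false else if PySem.Set.contains touche u then bSimp nbr' u else flag.getD u false)
  (nbr', flag')

-- the 'while True' loop; it removes a distinct vertex each round, so n rounds of fuel suffice
def bLoop (n : Nat) (nbr : List (PySem.Set Nat)) (flag : List Bool) (res : List Int) : Nat → List Int
  | 0 => res
  | fuel + 1 =>
    match bNext flag (List.range n) with
    | none => res
    | some v =>
      let st := bStep n nbr flag v
      bLoop n st.1 st.2 (res ++ [(v : Int)]) fuel

def trouver_sommets_simpliciaux_et_les_supprimer_alt (matrice_adjacence : List (List Int)) : List Int :=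
  let n := matrice_adjacence.length
  let nbr := bNbr matrice_adjacence n
  let flag := (List.range n).map (fun v => bSimp nbr v)
  bLoop n nbr flag [] n

-- ===== PRECONDITION & SPEC =====
-- Pre_ excludes exactly the inputs on which A raises IndexError (some row shorter than the number
-- of rows; the two Pythons raise there alike). The Lean equivalence proof below does not consume
-- the hypothesis: the two total ports agree on every input.
def Pre_trouver_sommets_simpliciaux_et_les_supprimer (matrice_adjacence : List (List Int)) : Prop :=
  ∀ row ∈ matrice_adjacence, matrice_adjacence.length ≤ row.length
instance (matrice_adjacence : List (List Int)) : Decidable (Pre_trouver_sommets_simpliciaux_et_les_supprimer matrice_adjacence) := by unfold Pre_trouver_sommets_simpliciaux_et_les_supprimer; infer_instance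

def pvWitness_trouver_sommets_simpliciaux_et_les_supprimer : List (List Int) := [[0, 1], [1, 0]]

def Spec_trouver_sommets_simpliciaux_et_les_supprimer (matrice_adjacence : List (List Int)) (out : List Int) : Prop := out = trouver_sommets_simpliciaux_et_les_supprimer_alt matrice_adjacence
instance (matrice_adjacence : List (List Int)) (out : List Int) : Decidable (Spec_trouver_sommets_simpliciaux_et_les_supprimer matrice_adjacence out) := by unfold Spec_trouver_sommets_simpliciaux_et_les_supprimer; infer_instance

-- ===== CLAIM (what is proved, stated in full; the proofs are below) =====
def Claim_equal_trouver_sommets_simpliciaux_et_les_supprimer : Prop := ∀ (matrice_adjacence : List (List Int)), Dom_trouver_sommets_simpliciaux_et_les_supprimer matrice_adjacence → Pre_trouver_sommets_simpliciaux_et_les_supprimer matrice_adjacence → Spec_trouver_sommets_simpliciaux_et_les_supprimer matrice_adjacence (trouver_sommets_simpliciaux_et_les_supprimer matrice_adjacence)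

-- ===== LEMMAS AND PROOFS =====

-- neighbor list of v in the current matrix (the 'voisins' comprehension)
def adjL (n : Nat) (M : List (List Int)) (v : Nat) : List Nat :=
  (List.range n).filter (fun w => pvGet M v w == 1)

-- the adjacency-set table B maintains, expressed from A's current matrix
def NB (n : Nat) (M : List (List Int)) : List (PySem.Set Nat) :=
  (List.range n).map (fun v => adjL n M v)

-- the flag table B maintains, expressed from A's current matrix via A's per-vertex test
def condA (n : Nat) (M : List (List Int)) (v : Nat) : Bool :=
  decide (1 ≤ (adjL n M v).length) &&
    ((List.range (adjL n M v).length).all (fun i =>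
      (List.range (adjL n M v).length).all (fun j => j == i ||
        (((adjL n M v).map (fun a => (adjL n M v).map (fun b => pvGet M a b))).getD i []).getD j 0 == 1)))

def flagOf (n : Nat) (M : List (List Int)) : List Bool :=
  (List.range n).map (fun v => condA n M v)

lemma adjL_nodup (n : Nat) (M : List (List Int)) (v : Nat) : (adjL n M v).Nodup :=
  List.Nodup.filter _ (List.nodup_range)

lemma mem_adjL (n : Nat) (M : List (List Int)) (v w : Nat) :
    w ∈ adjL n M v ↔ w < n ∧ pvGet M v w = 1 := by
  simp [adjL, List.mem_filter, List.mem_range]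

lemma bNbr_eq_NB (M : List (List Int)) (n : Nat) : bNbr M n = NB n M := by
  unfold bNbr NB adjL
  refine List.map_congr_left (fun v _ => ?_)
  exact PySem.Set.ofList_eq_self_of_nodup _ (List.Nodup.filter _ List.nodup_range)

lemma rowset (r : List Int) (j b : Nat) : (r.set j 0).getD b 0 = if b = j then 0 else r.getD b 0 := by
  rcases eq_or_ne b j with rfl | hne
  · by_cases hj : b < r.length
    · simp [List.getD_eq_getElem?_getD, List.getElem?_set_self (by simpa using hj)]
    · simp [List.getD_eq_getElem?_getD, hj]
  · simp [List.getD_eq_getElem?_getD, List.getElem?_set_ne (Ne.symm hne), hne]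

lemma matset (M : List (List Int)) (i : Nat) (r : List Int) (a : Nat) :
    (M.set i r).getD a [] = if a = i ∧ i < M.length then r else M.getD a [] := by
  rcases eq_or_ne a i with rfl | hne
  · by_cases hi : a < M.length
    · simp [List.getD_eq_getElem?_getD, hi]
    · simp [List.getD_eq_getElem?_getD, hi]
  · simp [List.getD_eq_getElem?_getD, List.getElem?_set_ne (Ne.symm hne), hne]

lemma pvGet_pvSet0 (M : List (List Int)) (i j a b : Nat) :
    pvGet (pvSet0 M i j) a b = if a = i ∧ b = j then 0 else pvGet M a b := by
  unfold pvGet pvSet0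
  rw [matset]
  by_cases hi : a = i ∧ i < M.length
  · obtain ⟨rfl, hlt⟩ := hi
    rw [if_pos ⟨rfl, hlt⟩, rowset]
    split_ifs with h1 h2 h2 <;> simp_all
  · rw [if_neg hi]
    by_cases h : a = i ∧ b = j
    · obtain ⟨rfl, rfl⟩ := h
      have hge : M.length ≤ a := by omega
      simp [List.getD_eq_getElem?_getD, List.getElem?_eq_none hge]
    · rw [if_neg h]

lemma supprimer_foldl_pvGet (v : Nat) (l : List Nat) : ∀ (M : List (List Int)) (a b : Nat),
    pvGet (l.foldl (fun M i => pvSet0 (pvSet0 M i v) v i) M) a b =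
      if (b = v ∧ a ∈ l) ∨ (a = v ∧ b ∈ l) then 0 else pvGet M a b := by
  induction l with
  | nil => simp
  | cons i rest ih =>
    intro M a b
    rw [List.foldl_cons, ih]
    by_cases h : (b = v ∧ a ∈ rest) ∨ (a = v ∧ b ∈ rest)
    · rw [if_pos h, if_pos (by rcases h with ⟨h1,h2⟩|⟨h1,h2⟩; exacts [Or.inl ⟨h1, List.mem_cons_of_mem _ h2⟩, Or.inr ⟨h1, List.mem_cons_of_mem _ h2⟩])]
    · rw [if_neg h, pvGet_pvSet0, pvGet_pvSet0]
      split_ifs with g1 g2 g3 <;> simp_all [List.mem_cons]; tauto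

lemma foldl_pvSet_len (v : Nat) (l : List Nat) : ∀ (M : List (List Int)),
    (l.foldl (fun M i => pvSet0 (pvSet0 M i v) v i) M).length = M.length := by
  induction l with
  | nil => simp
  | cons i rest ih => intro M; rw [List.foldl_cons, ih]; simp [pvSet0]

lemma supprimer_length (v : Nat) (M : List (List Int)) :
    (supprimer_sommet v M).length = M.length := by
  unfold supprimer_sommet; exact foldl_pvSet_len v _ M

lemma supprimer_pvGet (v : Nat) (M : List (List Int)) (a b : Nat) :
    pvGet (supprimer_sommet v M) a b =
      if (b = v ∧ a < M.length) ∨ (a = v ∧ b < M.length) then 0 else pvGet M a b := by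
  simp [supprimer_sommet, supprimer_foldl_pvGet, List.mem_range]

lemma sous_getD (L : List Nat) (M : List (List Int)) (i j : Nat) (hi : i < L.length) (hj : j < L.length) :
    ((L.map (fun a => L.map (fun b => pvGet M a b))).getD i []).getD j 0 = pvGet M L[i] L[j] := by
  simp [List.getD_eq_getElem?_getD, hi, hj]

lemma condA_iff (n : Nat) (M : List (List Int)) (v : Nat) :
    condA n M v = true ↔
      adjL n M v ≠ [] ∧ ∀ u ∈ adjL n M v, ∀ w ∈ adjL n M v, w ≠ u → pvGet M u w = 1 := by
  have hnd := adjL_nodup n M v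
  set L := adjL n M v with hL
  constructor
  · rintro hc
    rw [condA, Bool.and_eq_true] at hc
    obtain ⟨h1, h2⟩ := hc
    refine ⟨List.ne_nil_of_length_pos (of_decide_eq_true h1), ?_⟩
    intro u hu w hw hne
    obtain ⟨i, hi, rfl⟩ := List.mem_iff_getElem.mp hu
    obtain ⟨j, hj, rfl⟩ := List.mem_iff_getElem.mp hw
    simp only [List.all_eq_true, List.mem_range] at h2
    have htest := h2 i hi j hj
    rcases Bool.or_eq_true_iff.mp htest with h | h
    · cases eq_of_beq h; exact absurd rfl hne
    · rw [show (((L.map (fun a => L.map (fun b => pvGet M a b))).getD i []).getD j 0) = pvGet M L[i] L[j] from sous_getD L M i j hi hj] at h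
      exact of_decide_eq_true (by simpa using h)
  · rintro ⟨hnil, hcl⟩
    rw [condA, Bool.and_eq_true]
    refine ⟨decide_eq_true (List.length_pos_of_ne_nil hnil), ?_⟩
    simp only [List.all_eq_true, List.mem_range]
    intro i hi j hj
    rcases eq_or_ne j i with rfl | hji
    · simp
    · refine Bool.or_eq_true_iff.mpr (Or.inr ?_)
      rw [show (((L.map (fun a => L.map (fun b => pvGet M a b))).getD i []).getD j 0) = pvGet M L[i] L[j] from sous_getD L M i j hi hj]
      have hnev : L[j] ≠ L[i] := fun hcontra => hji (List.Nodup.getElem_inj_iff hnd |>.mp hcontra)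
      simpa using hcl L[i] (List.getElem_mem hi) L[j] (List.getElem_mem hj) hnev

lemma aScan_eq_find (n : Nat) (M : List (List Int)) (res : List Int) (l : List Nat) :
    aScan n M res l =
      match l.find? (fun v => condA n M v) with
      | none => (M, res)
      | some v => (supprimer_sommet v M, res ++ [(v : Int)]) := by
  induction l with
  | nil => rfl
  | cons v rest ih =>
    rw [List.find?_cons]
    by_cases h1 : 1 ≤ (adjL n M v).length
    · by_cases h2 : ((List.range (adjL n M v).length).all (fun i =>
        (List.range (adjL n M v).length).all (fun j => j == i ||
          (((adjL n M v).map (fun a => (adjL n M v).map (fun b => pvGet M a b))).getD i []).getD j 0 == 1))) = true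
      · have hc : condA n M v = true := by unfold condA; rw [h2, Bool.and_true]; exact decide_eq_true h1
        simp only [aScan, adjL] at *
        rw [if_pos h1, if_pos h2, hc]
      · have hc : condA n M v = false := by unfold condA; rw [Bool.eq_false_iff.mpr h2, Bool.and_false]
        simp only [aScan, adjL] at *
        rw [if_pos h1, if_neg (by simpa using h2), hc, ih]
    · have hc : condA n M v = false := by unfold condA; rw [decide_eq_false h1, Bool.false_and]
      simp only [aScan, adjL] at *
      rw [if_neg h1, hc, ih]

lemma NB_getD_lt (n : Nat) (M : List (List Int)) (v : Nat) (h : v < n) :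
    (NB n M).getD v [] = adjL n M v := by
  simp [NB, List.getD_eq_getElem?_getD, List.getElem?_map, List.getElem?_range h]

lemma flagOf_getD (n : Nat) (M : List (List Int)) (v : Nat) (h : v < n) :
    (flagOf n M).getD v false = condA n M v := by
  simp [flagOf, List.getD_eq_getElem?_getD, List.getElem?_map, List.getElem?_range h]

lemma bSimp_eq (n : Nat) (M : List (List Int)) (v : Nat) (hv : v < n) :
    bSimp (NB n M) v = condA n M v := by
  rw [Bool.eq_iff_iff, condA_iff]
  unfold bSimp
  rw [NB_getD_lt n M v hv]
  simp only [Bool.and_eq_true]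
  constructor
  · rintro ⟨h1, h2⟩
    refine ⟨by simpa using h1, ?_⟩
    intro u hu w hw hne
    simp only [List.all_eq_true] at h2
    have hsub := (PySem.Set.issubset_iff _ _).mp (h2 u hu)
    have hun : u < n := ((mem_adjL n M v u).mp hu).1
    have hwmem : w ∈ PySem.Set.diff (adjL n M v) [u] := by
      rw [PySem.Set.mem_diff _ _ _]
      exact ⟨hw, by simpa using hne⟩
    have := hsub w hwmem
    rw [NB_getD_lt n M u hun] at this
    exact ((mem_adjL n M u w).mp this).2
  · rintro ⟨hnil, hcl⟩
    refine ⟨by simpa using hnil, ?_⟩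
    simp only [List.all_eq_true]
    intro u hu
    apply (PySem.Set.issubset_iff _ _).mpr
    intro w hw
    rw [PySem.Set.mem_diff] at hw
    obtain ⟨hwmem, hwne⟩ := hw
    have hun : u < n := ((mem_adjL n M v u).mp hu).1
    have hwn : w < n := ((mem_adjL n M v w).mp hwmem).1
    rw [NB_getD_lt n M u hun]
    exact (mem_adjL n M u w).mpr ⟨hwn, hcl u hu w hwmem (by simpa using hwne)⟩

lemma adjL_supp_self (n v : Nat) (M : List (List Int)) (hlen : M.length = n) :
    adjL n (supprimer_sommet v M) v = [] := by
  refine List.filter_eq_nil_iff.mpr ?_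
  intro w hw
  have hwn : w < n := List.mem_range.mp hw
  have h0 : pvGet (supprimer_sommet v M) v w = 0 := by
    rw [supprimer_pvGet]; exact if_pos (Or.inr ⟨rfl, by omega⟩)
  simp [h0]

lemma adjL_supp_ne (n v u : Nat) (M : List (List Int)) (hne : u ≠ v) :
    adjL n (supprimer_sommet v M) u = PySem.Set.diff (adjL n M u) [v] := by
  unfold adjL PySem.Set.diff
  rw [List.filter_filter]
  apply List.filter_congr
  intro w hw
  rcases eq_or_ne w v with rfl | hwv
  · have h0 : pvGet (supprimer_sommet w M) u w = 0 := by
      rcases Nat.lt_or_ge u M.length with h | h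
      · rw [supprimer_pvGet]; exact if_pos (Or.inl ⟨rfl, h⟩)
      · rw [supprimer_pvGet, if_neg (by intro hc; rcases hc with ⟨_,h2⟩|⟨h1,_⟩; exacts [absurd h2 (by omega), absurd h1 hne])]
        unfold pvGet
        simp [List.getD_eq_getElem?_getD, List.getElem?_eq_none h]
    simp [h0, PySem.Set.contains]
  · have h1 : pvGet (supprimer_sommet v M) u w = pvGet M u w := by
      rw [supprimer_pvGet, if_neg (by tauto)]
    simp [h1, PySem.Set.contains, hwv]

lemma condA_local (n v u : Nat) (M : List (List Int)) (hne : u ≠ v)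
    (hnv : v ∉ adjL n M u) :
    condA n (supprimer_sommet v M) u = condA n M u := by
  have hadj : adjL n (supprimer_sommet v M) u = adjL n M u := by
    rw [adjL_supp_ne n v u M hne]
    unfold PySem.Set.diff
    refine List.filter_eq_self.mpr ?_
    intro w hw
    simp only [PySem.Set.contains]
    have : w ≠ v := fun h => hnv (h ▸ hw)
    simp [this]
  rw [Bool.eq_iff_iff, condA_iff, condA_iff, hadj]
  have hget : ∀ a ∈ adjL n M u, ∀ b ∈ adjL n M u,
      pvGet (supprimer_sommet v M) a b = pvGet M a b := by
    intro a ha b hb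
    have hav : a ≠ v := fun h => hnv (h ▸ ha)
    have hbv : b ≠ v := fun h => hnv (h ▸ hb)
    rw [supprimer_pvGet, if_neg (by tauto)]
  constructor
  · rintro ⟨h1, h2⟩
    exact ⟨h1, fun a ha b hb hne' => by rw [← hget a ha b hb]; exact h2 a ha b hb hne'⟩
  · rintro ⟨h1, h2⟩
    exact ⟨h1, fun a ha b hb hne' => by rw [hget a ha b hb]; exact h2 a ha b hb hne'⟩

lemma condA_supp_self (n v : Nat) (M : List (List Int)) (hlen : M.length = n) :
    condA n (supprimer_sommet v M) v = false := by
  unfold condA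
  rw [adjL_supp_self n v M hlen]
  simp

lemma mapAdj_getD (n : Nat) (M : List (List Int)) (u : Nat) (h : u < n) :
    ((List.range n).map (fun v => adjL n M v)).getD u [] = adjL n M u := by
  simp [List.getD_eq_getElem?_getD, List.getElem?_map, List.getElem?_range h]

lemma mapCond_getD (n : Nat) (M : List (List Int)) (u : Nat) (h : u < n) :
    ((List.range n).map (fun v => condA n M v)).getD u false = condA n M u := by
  simp [List.getD_eq_getElem?_getD, List.getElem?_map, List.getElem?_range h]

lemma NB_step (n v : Nat) (M : List (List Int)) (hv : v < n) (hlen : M.length = n) :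
    ((List.range n).map (fun u =>
      if u == v then ([] : PySem.Set Nat) else PySem.Set.diff ((NB n M).getD u []) [v])) =
      NB n (supprimer_sommet v M) := by
  unfold NB
  refine List.map_congr_left (fun u hu => ?_)
  have hun : u < n := List.mem_range.mp hu
  rcases eq_or_ne u v with rfl | hne
  · simp [adjL_supp_self n u M hlen]
  · simp only [beq_iff_eq, if_neg hne]
    rw [mapAdj_getD n M u hun, adjL_supp_ne n v u M hne]

lemma touche_contains (n v u : Nat) (M : List (List Int)) (hun : u < n) :
    PySem.Set.contains
      (PySem.Set.ofList ((List.range n).filter (fun u => PySem.Set.contains ((NB n M).getD u []) v))) u =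
      decide (v ∈ adjL n M u) := by
  by_cases hmem : v ∈ adjL n M u
  · rw [decide_eq_true hmem]
    apply (PySem.Set.contains_iff _ _).mpr
    rw [PySem.Set.mem_ofList]
    refine List.mem_filter.mpr ⟨List.mem_range.mpr hun, ?_⟩
    rw [NB_getD_lt n M u hun]
    exact (PySem.Set.contains_iff _ _).mpr hmem
  · rw [decide_eq_false hmem]
    apply Bool.eq_false_iff.mpr
    intro hc
    have := (PySem.Set.contains_iff _ _).mp hc
    rw [PySem.Set.mem_ofList] at this
    obtain ⟨-, hm⟩ := List.mem_filter.mp this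
    rw [NB_getD_lt n M u hun] at hm
    exact hmem ((PySem.Set.contains_iff _ _).mp hm)

lemma bStep_eq (n v : Nat) (M : List (List Int)) (hv : v < n) (hlen : M.length = n) :
    bStep n (NB n M) (flagOf n M) v = (NB n (supprimer_sommet v M), flagOf n (supprimer_sommet v M)) := by
  unfold bStep
  simp only
  rw [NB_step n v M hv hlen]
  refine Prod.ext rfl ?_
  simp only
  unfold flagOf
  refine List.map_congr_left (fun u hu => ?_)
  have hun : u < n := List.mem_range.mp hu
  rcases eq_or_ne u v with rfl | hne
  · simp [condA_supp_self n u M hlen]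
  · simp only [beq_iff_eq, if_neg hne]
    rw [touche_contains n v u M hun]
    by_cases hmem : v ∈ adjL n M u
    · rw [decide_eq_true hmem]
      simp only [if_true]
      exact bSimp_eq n (supprimer_sommet v M) u hun
    · rw [decide_eq_false hmem]
      simp only [Bool.false_eq_true, if_neg (by exact fun h => h)]
      rw [mapCond_getD n M u hun, condA_local n v u M hne hmem]

lemma bNext_eq_find (flag : List Bool) (l : List Nat) :
    bNext flag l = l.find? (fun u => flag.getD u false) := by
  induction l with
  | nil => rfl
  | cons v rest ih =>
    rw [List.find?_cons]
    unfold bNext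
    cases h : flag.getD v false <;> simp [ih]

lemma find?_congr_mem {α : Type} (l : List α) (f g : α → Bool)
    (h : ∀ x ∈ l, f x = g x) : l.find? f = l.find? g := by
  induction l with
  | nil => rfl
  | cons x xs ih =>
    simp only [List.find?_cons, h x (List.mem_cons_self ..)]
    cases g x <;> simp [ih (fun y hy => h y (List.mem_cons_of_mem _ hy))]

lemma bNext_flagOf (n : Nat) (M : List (List Int)) :
    bNext (flagOf n M) (List.range n) = (List.range n).find? (fun v => condA n M v) := by
  rw [bNext_eq_find]
  exact find?_congr_mem _ _ _ (fun u hu => flagOf_getD n M u (List.mem_range.mp hu))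

lemma bLoop_none (n : Nat) (nbr : List (PySem.Set Nat)) (flag : List Bool) (res : List Int) (k : Nat)
    (h : bNext flag (List.range n) = none) : bLoop n nbr flag res k = res := by
  cases k <;> simp [bLoop, h]

lemma main_loop (n : Nat) (k : Nat) : ∀ (M : List (List Int)) (res : List Int), M.length = n →
    ((List.range k).foldl (fun st _ => aScan n st.1 st.2 (List.range n)) (M, res)).2 =
      bLoop n (NB n M) (flagOf n M) res k := by
  induction k with
  | zero => intro M res _; rfl
  | succ k ih =>
    intro M res hlen
    rw [List.range_succ_eq_map, List.foldl_cons, List.foldl_map]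
    rw [aScan_eq_find]
    cases hf : (List.range n).find? (fun v => condA n M v) with
    | none =>
      have hbf : bNext (flagOf n M) (List.range n) = none := by rw [bNext_flagOf, hf]
      simp only
      rw [ih M res hlen, bLoop_none n _ _ res k hbf, bLoop_none n _ _ res (k+1) hbf]
    | some v =>
      have hv : v < n := List.mem_range.mp (List.mem_of_find?_eq_some hf)
      have hbf : bNext (flagOf n M) (List.range n) = some v := by rw [bNext_flagOf, hf]
      simp only
      conv_rhs => rw [bLoop]
      rw [hbf]
      simp only [bStep_eq n v M hv hlen]
      exact ih (supprimer_sommet v M) (res ++ [(v : Int)]) (by rw [supprimer_length, hlen])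

-- ===== VERDICT (by name: the statement is the Claim_ definition above) =====
theorem trouver_sommets_simpliciaux_et_les_supprimer_spec : Claim_equal_trouver_sommets_simpliciaux_et_les_supprimer := by
  intro M _ _
  unfold Spec_trouver_sommets_simpliciaux_et_les_supprimer
  unfold trouver_sommets_simpliciaux_et_les_supprimer trouver_sommets_simpliciaux_et_les_supprimer_alt
  simp only [bNbr_eq_NB]
  have hflag : (List.range M.length).map (fun v => bSimp (NB M.length M) v) = flagOf M.length M :=
    List.map_congr_left (fun v hv => bSimp_eq M.length M v (List.mem_range.mp hv))
  rw [hflag]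
  exact main_loop M.length M.length M [] rfl
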